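-- pv_equiv track=rewrite | github.com/anatol21/Blokus_GenAI | src/blokus/automation.py | classify_failure_category
-- ===== SOURCE A (Python) =====
-- from typing import Iterable
--
-- def classify_failure_category(job_names: Iterable[str]) -> str:
--     """Map failing CI job names into the Phase 3 repair categories."""
--
--     names = [name.lower() for name in job_names]
--     if any("lint" in name for name in names):
--         return "lint"
--     if any("cli-smoke" in name or "cli smoke" in name for name in names):
--         return "cli-smoke"
--     if any("fixture-schema" in name or ("fixture" in name and "schema" in name) for name in names):
--         return "fixture-schema"
--     if any(name == "test" or "unit" in name or "tests" in name for name in names):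
--         return "unit-test"
--     if any("evaluate" in name for name in names):
--         return "evaluate"
--     if any("environment" in name or "deployment" in name for name in names):
--         return "environment"
--     return "unknown"
-- ===== SOURCE B (Python) =====
-- def classify_failure_category(job_names):
--     lint = smoke = fixture = unit = evaluate = env = False
--     for name in job_names:
--         n = name.lower()
--         lint = lint or "lint" in n
--         smoke = smoke or "cli-smoke" in n or "cli smoke" in n
--         fixture = fixture or "fixture-schema" in n or ("fixture" in n and "schema" in n)
--         unit = unit or n == "test" or "unit" in n or "tests" in n
--         evaluate = evaluate or "evaluate" in n
--         env = env or "environment" in n or "deployment" in n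
--     if lint:
--         return "lint"
--     if smoke:
--         return "cli-smoke"
--     if fixture:
--         return "fixture-schema"
--     if unit:
--         return "unit-test"
--     if evaluate:
--         return "evaluate"
--     if env:
--         return "environment"
--     return "unknown"
-- ===== Notes on version B (the rewrite author's own statement) =====
-- stated objective: faster
-- what changed: Replaces six separate any() scans over a precomputed lowered list with a single pass that lowers each name once and accumulates six presence flags, then returns the first set flag in priority order.
import Mathlib
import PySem

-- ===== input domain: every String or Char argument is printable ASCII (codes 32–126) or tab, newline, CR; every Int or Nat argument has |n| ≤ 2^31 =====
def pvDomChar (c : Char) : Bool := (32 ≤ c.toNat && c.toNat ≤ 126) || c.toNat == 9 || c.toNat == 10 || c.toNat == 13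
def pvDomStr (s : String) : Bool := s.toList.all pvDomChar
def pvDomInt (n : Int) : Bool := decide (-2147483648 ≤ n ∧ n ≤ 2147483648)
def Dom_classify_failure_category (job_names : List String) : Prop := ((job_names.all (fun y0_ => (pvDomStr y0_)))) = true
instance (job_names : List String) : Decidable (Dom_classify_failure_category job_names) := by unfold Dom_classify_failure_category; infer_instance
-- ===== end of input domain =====

-- B replaces A's six separate any() scans by ONE pass accumulating six presence
-- flags (each name lowered once), consulted afterwards in priority order.

-- ===== PORT A =====
def classify_failure_category (job_names : List String) : String :=
  let names := job_names.map PySem.Str.lower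
  if names.any (fun n => PySem.Str.isIn "lint" n) then "lint"
  else if names.any (fun n => PySem.Str.isIn "cli-smoke" n || PySem.Str.isIn "cli smoke" n) then "cli-smoke"
  else if names.any (fun n => PySem.Str.isIn "fixture-schema" n || (PySem.Str.isIn "fixture" n && PySem.Str.isIn "schema" n)) then "fixture-schema"
  else if names.any (fun n => n == "test" || PySem.Str.isIn "unit" n || PySem.Str.isIn "tests" n) then "unit-test"
  else if names.any (fun n => PySem.Str.isIn "evaluate" n) then "evaluate"
  else if names.any (fun n => PySem.Str.isIn "environment" n || PySem.Str.isIn "deployment" n) then "environment"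
  else "unknown"

-- ===== PORT B =====
def pvStep (f : Bool × Bool × Bool × Bool × Bool × Bool) (name : String) :
    Bool × Bool × Bool × Bool × Bool × Bool :=
  let n := PySem.Str.lower name
  ((f.1 || PySem.Str.isIn "lint" n),
   (f.2.1 || PySem.Str.isIn "cli-smoke" n || PySem.Str.isIn "cli smoke" n),
   (f.2.2.1 || PySem.Str.isIn "fixture-schema" n || (PySem.Str.isIn "fixture" n && PySem.Str.isIn "schema" n)),
   (f.2.2.2.1 || n == "test" || PySem.Str.isIn "unit" n || PySem.Str.isIn "tests" n),
   (f.2.2.2.2.1 || PySem.Str.isIn "evaluate" n),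
   (f.2.2.2.2.2 || PySem.Str.isIn "environment" n || PySem.Str.isIn "deployment" n))

def classify_failure_category_alt (job_names : List String) : String :=
  let fl := job_names.foldl pvStep (false, false, false, false, false, false)
  if fl.1 then "lint"
  else if fl.2.1 then "cli-smoke"
  else if fl.2.2.1 then "fixture-schema"
  else if fl.2.2.2.1 then "unit-test"
  else if fl.2.2.2.2.1 then "evaluate"
  else if fl.2.2.2.2.2 then "environment"
  else "unknown"

-- ===== PRECONDITION & SPEC =====
def Spec_classify_failure_category (job_names : List String) (out : String) : Prop := out = classify_failure_category_alt job_names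
instance (job_names : List String) (out : String) : Decidable (Spec_classify_failure_category job_names out) := by unfold Spec_classify_failure_category; infer_instance

-- ===== CLAIM (what is proved, stated in full; the proofs are below) =====
def Claim_equal_classify_failure_category : Prop := ∀ (job_names : List String), Dom_classify_failure_category job_names → Spec_classify_failure_category job_names (classify_failure_category job_names)

-- ===== LEMMAS AND PROOFS =====

/-- The fold of `pvStep` computes, componentwise, the disjunction of the six
per-name conditions over the whole list (any-semantics). -/
theorem pvStep_foldl (l : List String) (f : Bool × Bool × Bool × Bool × Bool × Bool) :
    l.foldl pvStep f =
      ((f.1 || l.any (fun name => PySem.Str.isIn "lint" (PySem.Str.lower name))),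
       (f.2.1 || l.any (fun name => PySem.Str.isIn "cli-smoke" (PySem.Str.lower name) || PySem.Str.isIn "cli smoke" (PySem.Str.lower name))),
       (f.2.2.1 || l.any (fun name => PySem.Str.isIn "fixture-schema" (PySem.Str.lower name) || (PySem.Str.isIn "fixture" (PySem.Str.lower name) && PySem.Str.isIn "schema" (PySem.Str.lower name)))),
       (f.2.2.2.1 || l.any (fun name => PySem.Str.lower name == "test" || PySem.Str.isIn "unit" (PySem.Str.lower name) || PySem.Str.isIn "tests" (PySem.Str.lower name))),
       (f.2.2.2.2.1 || l.any (fun name => PySem.Str.isIn "evaluate" (PySem.Str.lower name))),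
       (f.2.2.2.2.2 || l.any (fun name => PySem.Str.isIn "environment" (PySem.Str.lower name) || PySem.Str.isIn "deployment" (PySem.Str.lower name)))) := by
  induction l generalizing f with
  | nil => simp
  | cons x xs ih =>
    simp only [List.foldl_cons, ih, pvStep, List.any_cons]
    simp [Bool.or_assoc]

-- ===== VERDICT (by name: the statement is the Claim_ definition above) =====
theorem classify_failure_category_spec : Claim_equal_classify_failure_category := by
  intro job_names _
  unfold Spec_classify_failure_category classify_failure_category classify_failure_category_alt
  simp only [pvStep_foldl, Bool.false_or, List.any_map, Function.comp_def]
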